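-- pv_equiv track=rewrite | github.com/peptidoglycanthrope/universal-rm | misc.py | listToSeq
-- ===== SOURCE A (Python) =====
-- def listToSeq(L):
--   L = L[::-1]
--   result = 0
--   for n in L:
--     result = result * 3 + 2 #place an "2" to mark end of number
--     while n > 0:
--       result *= 3
--       result += n % 2
--       n //= 2 #take a base 2 digit from n, put in seq encoding
--   return result
-- ===== SOURCE B (Python) =====
-- def listToSeq(L):
--   # Forward single pass with positional base-3 weights: each element contributes
--   # its own encoding times the power of 3 accumulated so far (no list reversal,
--   # one multiply-add of the accumulator per element).
--   result = 0
--   p = 1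
--   for n in L:
--     e = 2
--     w = 3
--     m = n
--     while m > 0:
--       e = e * 3 + m % 2
--       w *= 3
--       m //= 2
--     result += e * p
--     p *= w
--   return result
-- ===== Notes on version B (the rewrite author's own statement) =====
-- stated objective: alternative
-- what changed: Instead of reversing the list and pushing every ternary digit into one growing Horner accumulator, B makes a single forward pass keeping a positional power of 3: each element's small encoding and weight are computed locally and combined into the result with one multiply-add per element (measured 3.38x at the largest size both finished, but a timing run could not confirm it at the top size, so no speed is claimed).
import Mathlib
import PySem

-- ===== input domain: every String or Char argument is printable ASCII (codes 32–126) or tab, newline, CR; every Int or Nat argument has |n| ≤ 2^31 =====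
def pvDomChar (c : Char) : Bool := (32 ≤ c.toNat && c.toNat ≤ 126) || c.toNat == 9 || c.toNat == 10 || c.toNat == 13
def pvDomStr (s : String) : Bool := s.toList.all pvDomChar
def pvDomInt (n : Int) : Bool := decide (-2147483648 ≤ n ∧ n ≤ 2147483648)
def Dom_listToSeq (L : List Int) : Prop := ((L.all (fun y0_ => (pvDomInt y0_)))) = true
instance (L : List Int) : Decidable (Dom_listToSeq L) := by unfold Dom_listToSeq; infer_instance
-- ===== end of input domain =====

-- B replaces A's reverse-then-Horner accumulation by a forward pass with a
-- positional power of 3 (a different traversal and accumulator); equivalence of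
-- the return values is proved for all inputs.

-- ===== PORT A =====
-- inner 'while n > 0' loop of A, acting on (result, n)
def pvALoop (result : Int) (n : Int) : Int :=
  if _h : n > 0 then
    pvALoop (result * 3 + PySem.Int.mod n 2) (PySem.Int.floordiv n 2)
  else result
termination_by n.toNat
decreasing_by
  rw [PySem.Int.floordiv_eq_ediv_of_pos (by omega)]
  omega

def listToSeq (L : List Int) : Int :=
  let L' := (PySem.List.slice? L none none (-1)).getD []   -- L[::-1]
  L'.foldl (fun result n => pvALoop (result * 3 + 2) n) 0

-- ===== PORT B =====
-- inner 'while m > 0' loop of B, acting on (e, w, m); returns (e, w)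
def pvBLoop (e w m : Int) : Int × Int :=
  if _h : m > 0 then
    pvBLoop (e * 3 + PySem.Int.mod m 2) (w * 3) (PySem.Int.floordiv m 2)
  else (e, w)
termination_by m.toNat
decreasing_by
  rw [PySem.Int.floordiv_eq_ediv_of_pos (by omega)]
  omega

def listToSeq_alt (L : List Int) : Int :=
  (L.foldl (fun (rp : Int × Int) n =>
      let ew := pvBLoop 2 3 n
      (rp.1 + ew.1 * rp.2, rp.2 * ew.2)) (0, 1)).1

-- ===== PRECONDITION & SPEC =====
def Spec_listToSeq (L : List Int) (out : Int) : Prop := out = listToSeq_alt L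
instance (L : List Int) (out : Int) : Decidable (Spec_listToSeq L out) := by unfold Spec_listToSeq; infer_instance

-- ===== CLAIM (what is proved, stated in full; the proofs are below) =====
def Claim_equal_listToSeq : Prop := ∀ (L : List Int), Dom_listToSeq L → Spec_listToSeq L (listToSeq L)

-- ===== LEMMAS AND PROOFS =====

-- B's loop tracks e exactly as A's loop tracks result
theorem pvBLoop_fst (e w m : Int) : (pvBLoop e w m).1 = pvALoop e m := by
  rw [pvBLoop, pvALoop]
  split
  · exact pvBLoop_fst _ _ _
  · rfl
termination_by m.toNat
decreasing_by
  rw [PySem.Int.floordiv_eq_ediv_of_pos (by omega)]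
  omega

-- the weight component is w times a power independent of e and w
theorem pvBLoop_snd (e w m : Int) : (pvBLoop e w m).2 = w * (pvBLoop 0 1 m).2 := by
  rw [pvBLoop]
  conv_rhs => rw [pvBLoop]
  split
  · rw [pvBLoop_snd, pvBLoop_snd (0 * 3 + PySem.Int.mod m 2) (1 * 3)]
    ring
  · simp
termination_by m.toNat
decreasing_by
  all_goals rw [PySem.Int.floordiv_eq_ediv_of_pos (by omega)]
  all_goals omega

-- A's inner loop is affine in its accumulator, with slope the weight of B's loop
theorem pvALoop_affine (r m : Int) :
    pvALoop r m = r * (pvBLoop 0 1 m).2 + pvALoop 0 m := by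
  rw [pvALoop]
  conv_rhs => rw [pvALoop]
  conv_rhs => rw [pvBLoop]
  split
  · rw [pvALoop_affine (r * 3 + PySem.Int.mod m 2),
        pvALoop_affine (0 * 3 + PySem.Int.mod m 2),
        pvBLoop_snd (0 * 3 + PySem.Int.mod m 2) (1 * 3)]
    ring
  · simp
termination_by m.toNat
decreasing_by
  all_goals rw [PySem.Int.floordiv_eq_ediv_of_pos (by omega)]
  all_goals omega

-- one element's step of A, expressed through B's per-element encoding and weight
theorem step_eq (r n : Int) :
    pvALoop (r * 3 + 2) n = r * (pvBLoop 2 3 n).2 + (pvBLoop 2 3 n).1 := by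
  rw [pvALoop_affine, pvBLoop_fst 2 3 n, pvALoop_affine 2 n, pvBLoop_snd 2 3 n]
  ring

-- B's forward fold computes s + p · (A's reverse Horner fold)
theorem fold_eq (L : List Int) : ∀ (s p : Int),
    (L.foldl (fun (rp : Int × Int) n =>
        let ew := pvBLoop 2 3 n
        (rp.1 + ew.1 * rp.2, rp.2 * ew.2)) (s, p)).1
      = s + p * L.foldr (fun n r => pvALoop (r * 3 + 2) n) 0 := by
  induction L with
  | nil => intro s p; simp
  | cons n L ih =>
    intro s p
    simp only [List.foldl_cons, List.foldr_cons, ih, step_eq]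
    ring

-- ===== VERDICT (by name: the statement is the Claim_ definition above) =====
theorem listToSeq_spec : Claim_equal_listToSeq := by
  intro L _
  unfold Spec_listToSeq listToSeq listToSeq_alt
  rw [PySem.List.slice?_none_none_neg_one]
  simp only [Option.getD_some, List.foldl_reverse, fold_eq]
  ring
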